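-- pv_equiv track=rewrite | github.com/thierryxdp/TCC | problems/835/solution_346907.py | melhor_volta
-- ===== SOURCE A (Python) =====
-- def melhor_volta(matriz):
--
--     tempos = []
--     for i in matriz:
--         for j in i:
--             tempos.append(j)
--
--     tempo = min(tempos)
--     contador = 0
--     while tempo not in matriz[contador]:
--         contador += 1
--     corredor = contador + 1
--     n_volta = matriz[contador].index(tempo) +1
--
--     return corredor, tempo, n_volta
-- ===== SOURCE B (Python) =====
-- def melhor_volta(matriz):
--     best = None
--     for r, linha in enumerate(matriz):
--         for c, v in enumerate(linha):
--             if best is None or v < best[0]: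
--                 best = (v, r, c)
--     if best is None:
--         raise ValueError("min() arg is an empty sequence")
--     v, r, c = best
--     return r + 1, v, c + 1
-- ===== Notes on version B (the rewrite author's own statement) =====
-- stated objective: alternative
-- what changed: Replaces A's three phases (flatten the matrix, take min of the flat list, then re-scan rows and call .index to locate it) by a single row-major pass with enumerate that tracks the minimum value and its first position with a strict-< update.
import Mathlib
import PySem

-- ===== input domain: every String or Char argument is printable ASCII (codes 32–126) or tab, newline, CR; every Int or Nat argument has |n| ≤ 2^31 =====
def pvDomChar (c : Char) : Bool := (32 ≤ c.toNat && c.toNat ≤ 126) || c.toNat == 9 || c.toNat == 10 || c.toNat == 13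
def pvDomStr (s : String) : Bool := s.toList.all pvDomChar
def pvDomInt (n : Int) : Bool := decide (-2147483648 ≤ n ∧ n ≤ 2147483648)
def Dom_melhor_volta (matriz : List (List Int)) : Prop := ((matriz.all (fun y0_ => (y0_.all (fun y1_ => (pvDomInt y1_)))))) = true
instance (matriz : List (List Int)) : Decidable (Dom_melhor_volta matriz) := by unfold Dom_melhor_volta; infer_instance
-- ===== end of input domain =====

-- B replaces A's three phases (flatten, min, re-scan rows + .index) by one row-major pass
-- tracking the minimum and its first position (objective: alternative decomposition).

-- ===== PORT A =====
-- the 'while tempo not in matriz[contador]: contador += 1' loop, as structural recursion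
-- over the row suffix (contador counts rows passed; running off the end = IndexError, excluded by Pre_)
def pvWhileA (tempo : Int) : List (List Int) → Nat → Nat
  | [], c => c
  | l :: rs, c => if tempo ∈ l then c else pvWhileA tempo rs (c + 1)

def melhor_volta (matriz : List (List Int)) : Int × Int × Int :=
  let tempos := matriz.foldl (fun acc i => i.foldl (fun acc j => acc ++ [j]) acc) ([] : List Int)
  match PySem.List.min? tempos (fun x => x) with
  | none => (0, 0, 0)   -- min([]) raises ValueError; excluded by Pre_
  | some tempo =>
    let contador := pvWhileA tempo matriz 0
    let corredor : Int := (contador : Int) + 1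
    let n_volta : Int :=
      (((PySem.List.index? ((PySem.List.pyGet? matriz (contador : Int)).getD []) tempo).getD 0 : Nat) : Int) + 1
    (corredor, tempo, n_volta)

-- ===== PORT B =====
-- 'if best is None or v < best[0]: best = (v, r, c)'
def pvStep (b : Option (Int × Int × Int)) (r : Int) (cv : Int × Int) : Option (Int × Int × Int) :=
  match b with
  | none => some (cv.2, r, cv.1)
  | some best => if cv.2 < best.1 then some (cv.2, r, cv.1) else some best

def melhor_volta_alt (matriz : List (List Int)) : Int × Int × Int :=
  let best := (PySem.List.enumerate matriz).foldl
    (fun b rl => (PySem.List.enumerate rl.2).foldl (fun b cv => pvStep b rl.1 cv) b) none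
  match best with
  | none => (0, 0, 0)   -- raise ValueError; excluded by Pre_
  | some (v, r, c) => (r + 1, v, c + 1)

-- ===== PRECONDITION & SPEC =====
-- A raises ValueError (min of empty) when the matrix has no element at all; B raises there too.
def Pre_melhor_volta (matriz : List (List Int)) : Prop := matriz.flatten ≠ []
instance (matriz : List (List Int)) : Decidable (Pre_melhor_volta matriz) := by unfold Pre_melhor_volta; infer_instance
def pvWitness_melhor_volta : List (List Int) := [[3, 1], [2, 1]]

def Spec_melhor_volta (matriz : List (List Int)) (out : Int × Int × Int) : Prop := out = melhor_volta_alt matriz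
instance (matriz : List (List Int)) (out : Int × Int × Int) : Decidable (Spec_melhor_volta matriz out) := by unfold Spec_melhor_volta; infer_instance

-- ===== CLAIM (what is proved, stated in full; the proofs are below) =====
def Claim_equal_melhor_volta : Prop := ∀ (matriz : List (List Int)), Dom_melhor_volta matriz → Pre_melhor_volta matriz → Spec_melhor_volta matriz (melhor_volta matriz)

-- ===== LEMMAS AND PROOFS =====

-- the row-major list of (value, row, col) triples, rows numbered from s
def pvTriples (s : Int) (rows : List (List Int)) : List (Int × Int × Int) :=
  (PySem.List.enumerate rows s).flatMap
    (fun rl => (PySem.List.enumerate rl.2).map (fun cv => (cv.2, rl.1, cv.1)))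

-- the running-minimum loop on triples
def pvRunMin (m : Int × Int × Int) (T : List (Int × Int × Int)) : Int × Int × Int :=
  T.foldl (fun m t => if t.1 < m.1 then t else m) m

-- A's located answer (value, first row containing it, first column there), rows numbered from s
def pvLocate (tempo : Int) (rows : List (List Int)) (s : Int) : Int × Int × Int :=
  match rows with
  | [] => (tempo, s, 0)
  | l :: rs =>
    if tempo ∈ l then (tempo, s, (((PySem.List.index? l tempo).getD 0 : Nat) : Int))
    else pvLocate tempo rs (s + 1)

-- "t is the element of xs at the first index achieving the minimal value"
def pvFirstMin (xs : List (Int × Int × Int)) (t : Int × Int × Int) : Prop :=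
  ∃ i, ∃ h : i < xs.length, xs[i] = t ∧ (∀ y ∈ xs, t.1 ≤ y.1) ∧ (∀ j (hj : j < i), t.1 < (xs[j]).1)

theorem pvFirstMin_unique {xs : List (Int × Int × Int)} {t t' : Int × Int × Int}
    (h1 : pvFirstMin xs t) (h2 : pvFirstMin xs t') : t = t' := by
  obtain ⟨i, hi, hei, hmin, hstr⟩ := h1
  obtain ⟨i', hi', hei', hmin', hstr'⟩ := h2
  have ht : t ∈ xs := hei ▸ xs.getElem_mem hi
  have ht' : t' ∈ xs := hei' ▸ xs.getElem_mem hi'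
  rcases lt_trichotomy i i' with h | h | h
  · have h1 := hstr' i h
    rw [hei] at h1
    have h2 := hmin t' ht'
    omega
  · subst h
    rw [← hei, ← hei']
  · have h1 := hstr i' h
    rw [hei'] at h1
    have h2 := hmin' t ht
    omega

theorem pvRunMin_cons (m t : Int × Int × Int) (T : List (Int × Int × Int)) :
    pvRunMin m (t :: T) = pvRunMin (if t.1 < m.1 then t else m) T := rfl

theorem pvRunMin_firstMin (T : List (Int × Int × Int)) : ∀ m, pvFirstMin (m :: T) (pvRunMin m T) := by
  induction T with
  | nil =>
    intro m
    refine ⟨0, by simp, rfl, ?_, by omega⟩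
    intro y hy
    have : y = m := by simpa using hy
    simp [pvRunMin, this]
  | cons t T ih =>
    intro m
    rw [pvRunMin_cons]
    set m' := if t.1 < m.1 then t else m with hm'
    obtain ⟨i, hi, hei, hmin, hstr⟩ := ih m'
    set r := pvRunMin m' T with hrdef
    have hm'le : m'.1 ≤ m.1 ∧ m'.1 ≤ t.1 := by
      rw [hm']; split <;> constructor <;> omega
    have hrm' : r.1 ≤ m'.1 := hmin m' (by simp)
    have hminall : ∀ y ∈ m :: t :: T, r.1 ≤ y.1 := by
      intro y hy
      simp only [List.mem_cons] at hy
      rcases hy with rfl | rfl | hy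
      · omega
      · omega
      · exact hmin y (List.mem_cons_of_mem _ hy)
    match i, hi, hei with
    | 0, hi, hei =>
      simp only [List.getElem_cons_zero] at hei
      by_cases hlt : t.1 < m.1
      · have hm't : m' = t := by rw [hm', if_pos hlt]
        refine ⟨1, by simp, by simpa [hm't] using hei, hminall, ?_⟩
        intro j hj
        match j, hj with
        | 0, _ =>
          simp only [List.getElem_cons_zero]
          rw [← hei, hm't]; omega
      · have hm'm : m' = m := by rw [hm', if_neg hlt]
        refine ⟨0, by simp, by simpa [hm'm] using hei, hminall, by omega⟩
    | i + 1, hi, hei =>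
      simp only [List.getElem_cons_succ] at hei
      have h0 := hstr 0 (by omega)
      simp only [List.getElem_cons_zero] at h0
      refine ⟨i + 2, by simp at hi ⊢; omega, by simpa using hei, hminall, ?_⟩
      intro j hj
      match j, hj with
      | 0, _ => simp only [List.getElem_cons_zero]; omega
      | 1, _ => simp only [List.getElem_cons_succ, List.getElem_cons_zero]; omega
      | j + 2, hj =>
        simp only [List.getElem_cons_succ]
        exact hstr (j + 1) (by omega)

theorem pvTriples_cons (s : Int) (l : List Int) (rs : List (List Int)) :
    pvTriples s (l :: rs) =
      (PySem.List.enumerate l).map (fun cv => (cv.2, s, cv.1)) ++ pvTriples (s + 1) rs := by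
  simp [pvTriples, PySem.List.enumerate_cons]

theorem pvTriples_map_fst (s : Int) (rows : List (List Int)) :
    (pvTriples s rows).map (·.1) = rows.flatten := by
  induction rows generalizing s with
  | nil => simp [pvTriples]
  | cons l rs ih =>
    rw [pvTriples_cons]
    simp only [List.map_append, List.map_map, List.flatten_cons, ih]
    congr 1
    exact PySem.List.map_snd_enumerate (xs := l) (s := 0)

theorem pvMem_flatten_tail {tempo : Int} {l : List Int} {rs : List (List Int)}
    (hm : tempo ∈ (l :: rs).flatten) (hl : tempo ∉ l) : tempo ∈ rs.flatten := by
  have hm2 : tempo ∈ l ++ rs.flatten := by rw [← List.flatten_cons]; exact hm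
  rcases List.mem_append.1 hm2 with h | h
  · exact absurd h hl
  · exact h

theorem pvFirstMin_append_left {T1 T2 : List (Int × Int × Int)} {t : Int × Int × Int}
    (h : pvFirstMin T2 t) (hall : ∀ y ∈ T1, t.1 < y.1) : pvFirstMin (T1 ++ T2) t := by
  obtain ⟨i, hi, hei, hmin, hstr⟩ := h
  refine ⟨T1.length + i, by simp; omega, ?_, ?_, ?_⟩
  · rw [List.getElem_append_right (by omega)]
    simpa using hei
  · intro y hy
    rcases List.mem_append.1 hy with hy | hy
    · exact le_of_lt (hall y hy)
    · exact hmin y hy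
  · intro j hj
    by_cases hj1 : j < T1.length
    · rw [List.getElem_append_left hj1]
      exact hall _ (T1.getElem_mem hj1)
    · rw [List.getElem_append_right (by omega)]
      exact hstr (j - T1.length) (by omega)

theorem pvLocate_fst (rows : List (List Int)) (tempo : Int) :
    ∀ s, tempo ∈ rows.flatten → (pvLocate tempo rows s).1 = tempo := by
  induction rows with
  | nil => intro s h; simp at h
  | cons l rs ih =>
    intro s h
    rw [pvLocate]
    split
    · rfl
    · next hl => exact ih (s + 1) (pvMem_flatten_tail h hl)

theorem pvLocate_firstMin (rows : List (List Int)) (tempo : Int) :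
    ∀ s, tempo ∈ rows.flatten → (∀ y ∈ rows.flatten, tempo ≤ y) →
      pvFirstMin (pvTriples s rows) (pvLocate tempo rows s) := by
  induction rows with
  | nil => intro s h; simp at h
  | cons l rs ih =>
    intro s hmem hmin
    rw [pvTriples_cons]
    by_cases hl : tempo ∈ l
    · rw [pvLocate, if_pos hl]
      obtain ⟨k, hk⟩ := Option.isSome_iff_exists.1 ((PySem.List.index?_isSome_iff l tempo).2 hl)
      obtain ⟨hklt, hkeq, hkfst⟩ := PySem.List.getElem_of_index?_eq_some hk
      refine ⟨k, by simp [PySem.List.length_enumerate]; omega, ?_, ?_, ?_⟩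
      · rw [List.getElem_append_left (by simp [PySem.List.length_enumerate]; omega), hk]
        simp [PySem.List.getElem_enumerate, hkeq]
      · intro y hy
        rcases List.mem_append.1 hy with hy | hy
        · obtain ⟨cv, hcv, rfl⟩ := List.mem_map.1 hy
          obtain ⟨j, hj, rfl⟩ := (PySem.List.mem_enumerate_iff _ _ _).1 hcv
          exact hmin _ (by simpa using Or.inl (l.getElem_mem hj))
        · simp only [pvTriples] at hy
          obtain ⟨rl, hrl, hy2⟩ := List.mem_flatMap.1 hy
          obtain ⟨cv, hcv, rfl⟩ := List.mem_map.1 hy2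
          obtain ⟨j, hj, rfl⟩ := (PySem.List.mem_enumerate_iff _ _ _).1 hcv
          obtain ⟨rr, hrr, rfl⟩ := (PySem.List.mem_enumerate_iff _ _ _).1 hrl
          refine hmin _ (List.mem_flatten.2 ⟨_, List.mem_cons_of_mem l (List.getElem_mem hrr), List.getElem_mem hj⟩)
      · intro j hj
        rw [List.getElem_append_left (by simp [PySem.List.length_enumerate]; omega)]
        have hne := hkfst j hj
        have hle : tempo ≤ l[j]'(by omega) := hmin _ (by simpa using Or.inl (l.getElem_mem (by omega)))
        simp [PySem.List.getElem_enumerate]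
        omega
    · rw [pvLocate, if_neg hl]
      have hmem' : tempo ∈ rs.flatten := pvMem_flatten_tail hmem hl
      have hmin' : ∀ y ∈ rs.flatten, tempo ≤ y := fun y hy => hmin y (by simp at hy ⊢; tauto)
      have hfst : (pvLocate tempo rs (s + 1)).1 = tempo := pvLocate_fst rs tempo (s + 1) hmem'
      refine pvFirstMin_append_left (ih (s + 1) hmem' hmin') ?_
      intro y hy
      obtain ⟨cv, hcv, rfl⟩ := List.mem_map.1 hy
      obtain ⟨j, hj, rfl⟩ := (PySem.List.mem_enumerate_iff _ _ _).1 hcv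
      have hle : tempo ≤ l[j] := hmin _ (by simpa using Or.inl (l.getElem_mem hj))
      have hne : tempo ≠ l[j] := fun h => hl (h ▸ l.getElem_mem hj)
      rw [hfst]
      simp only []
      omega

-- A's computed components agree with pvLocate
theorem pvWhileA_shift (tempo : Int) (rows : List (List Int)) :
    ∀ c, pvWhileA tempo rows (c + 1) = pvWhileA tempo rows c + 1 := by
  induction rows generalizing tempo with
  | nil => intro c; rfl
  | cons l rs ih =>
    intro c
    by_cases h : tempo ∈ l <;> simp [pvWhileA, h, ih]

theorem pvLocate_eq_A (rows : List (List Int)) (tempo : Int) :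
    ∀ s, tempo ∈ rows.flatten → pvLocate tempo rows s =
      (tempo, s + (pvWhileA tempo rows 0 : Int),
       (((PySem.List.index? ((PySem.List.pyGet? rows ((pvWhileA tempo rows 0 : Nat) : Int)).getD []) tempo).getD 0 : Nat) : Int)) := by
  induction rows with
  | nil => intro s hm; simp at hm
  | cons l rs ih =>
    intro s hm
    by_cases hl : tempo ∈ l
    · simp [pvLocate, pvWhileA, hl]
    · have hm' : tempo ∈ rs.flatten := pvMem_flatten_tail hm hl
      have hw : pvWhileA tempo (l :: rs) 0 = pvWhileA tempo rs 0 + 1 := by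
        simp [pvWhileA, hl, pvWhileA_shift]
      rw [pvLocate, if_neg hl, ih (s + 1) hm', hw]
      have hget : PySem.List.pyGet? (l :: rs) ((((pvWhileA tempo rs 0 + 1) : Nat) : Int)) =
          PySem.List.pyGet? rs (((pvWhileA tempo rs 0 : Nat) : Int)) := by
        rw [PySem.List.pyGet?_natCast, PySem.List.pyGet?_natCast]
        simp
      rw [hget]
      refine Prod.ext rfl (Prod.ext (by simp; ring) rfl)

-- B's nested fold equals the flat running-minimum loop over pvTriples
theorem pvFold_some (T : List (Int × Int × Int)) :
    ∀ m, T.foldl (fun b t => pvStep b t.2.1 (t.2.2, t.1)) (some m) = some (pvRunMin m T) := by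
  induction T with
  | nil => intro m; rfl
  | cons t T ih =>
    intro m
    have h : pvStep (some m) t.2.1 (t.2.2, t.1) = some (if t.1 < m.1 then t else m) := by
      by_cases h : t.1 < m.1 <;> simp [pvStep, h]
    simp only [List.foldl_cons, h, ih]
    rfl

theorem pvB_fold_eq (rows : List (List Int)) :
    ∀ (s : Int) (b : Option (Int × Int × Int)),
      ((PySem.List.enumerate rows s).foldl
        (fun b rl => (PySem.List.enumerate rl.2).foldl (fun b cv => pvStep b rl.1 cv) b) b)
      = (pvTriples s rows).foldl (fun b t => pvStep b t.2.1 (t.2.2, t.1)) b := by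
  induction rows with
  | nil => intro s b; rfl
  | cons l rs ih =>
    intro s b
    rw [PySem.List.enumerate_cons, pvTriples_cons, List.foldl_cons, List.foldl_append, ih, List.foldl_map]

theorem pvTempos_eq (matriz : List (List Int)) :
    matriz.foldl (fun acc i => i.foldl (fun acc j => acc ++ [j]) acc) ([] : List Int) = matriz.flatten := by
  have h : (fun (acc : List Int) (i : List Int) => i.foldl (fun acc j => acc ++ [j]) acc)
      = fun acc i => acc ++ i := by
    funext acc i
    exact PySem.List.foldl_append_singleton_eq_self i acc
  rw [h, PySem.List.foldl_append_eq_flatten]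
  simp

-- ===== VERDICT (by name: the statement is the Claim_ definition above) =====
theorem melhor_volta_spec : Claim_equal_melhor_volta := by
  intro matriz _ hpre
  unfold Spec_melhor_volta
  unfold Pre_melhor_volta at hpre
  obtain ⟨tempo, htempo⟩ : ∃ t, PySem.List.min? matriz.flatten (fun x => x) = some t := by
    rcases h : PySem.List.min? matriz.flatten (fun x => x) with _ | t
    · exact absurd ((PySem.List.min?_eq_none_iff _ _).1 h) hpre
    · exact ⟨t, rfl⟩
  have hmem : tempo ∈ matriz.flatten := PySem.List.min?_mem htempo
  have hmin : ∀ y ∈ matriz.flatten, tempo ≤ y := PySem.List.min?_isMin htempo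
  have hloceq := pvLocate_eq_A matriz tempo 0 hmem
  have hA : melhor_volta matriz =
      ((pvLocate tempo matriz 0).2.1 + 1, (pvLocate tempo matriz 0).1, (pvLocate tempo matriz 0).2.2 + 1) := by
    rw [hloceq]
    simp only [melhor_volta, pvTempos_eq, htempo]
    simp
  obtain ⟨t0, T, hT⟩ : ∃ t0 T, pvTriples 0 matriz = t0 :: T := by
    rcases h : pvTriples 0 matriz with _ | ⟨t0, T⟩
    · exfalso
      have hmf := pvTriples_map_fst 0 matriz
      rw [h] at hmf
      exact hpre (by simpa using hmf.symm)
    · exact ⟨t0, T, rfl⟩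
  have hloc : pvRunMin t0 T = pvLocate tempo matriz 0 := by
    apply pvFirstMin_unique (xs := t0 :: T)
    · exact pvRunMin_firstMin T t0
    · rw [← hT]
      exact pvLocate_firstMin matriz tempo 0 hmem hmin
  have hB : melhor_volta_alt matriz =
      ((pvLocate tempo matriz 0).2.1 + 1, (pvLocate tempo matriz 0).1, (pvLocate tempo matriz 0).2.2 + 1) := by
    simp only [melhor_volta_alt]
    rw [pvB_fold_eq, hT, List.foldl_cons]
    have h0 : pvStep none t0.2.1 (t0.2.2, t0.1) = some t0 := rfl
    rw [h0, pvFold_some, hloc]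
  rw [hA, hB]
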